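-- pv_equiv track=rewrite | github.com/kkowenn/algorirhm-design | chatQuestion/Q30chat.py | max_energy_absorbed
-- ===== SOURCE A (Python) =====
-- def max_energy_absorbed(aircrafts):
--   """
--   Calculates the maximum energy absorbed by the shield using dynamic programming.
--
--   Args:
--       aircrafts: A list of integers representing the energy potential of each aircraft.
--
--   Returns:
--       The maximum energy absorbed by the shield.
--   """
--   n = len(aircrafts)
--   # Memoization table, -1 indicates value not calculated yet
--   memo = [[-1 for _ in range(2)] for _ in range(n + 1)]
--
--   def dp(index, cooldown):
--     """
--     Recursive function to calculate the maximum energy absorbed from a given index.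
--
--     Args:
--         index: Current aircraft index.
--         cooldown: Whether the shield is on cooldown (1) or not (0).
--
--     Returns:
--         The maximum energy absorbed up to the current aircraft.
--     """
--     # Base case: if we've gone through all aircraft
--     if index >= n:
--       return 0
--
--     # Check memo table
--     if memo[index][cooldown] != -1:
--       return memo[index][cooldown]
--
--     # Option 1: Skip the current aircraft
--     max_energy = dp(index + 1, 0)  # No cooldown after skipping
--
--     # Option 2: Absorb energy from the current and next aircraft (if not on cooldown)
--     if cooldown == 0 and index + 1 < n:
--       max_energy = max(max_energy, aircrafts[index] + aircrafts[index + 1] + dp(index + 2, 0))  # No cooldown after absorbing two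
--
--     # Save and return the result
--     memo[index][cooldown] = max_energy
--     return max_energy
--
--   return dp(0, 0)
-- ===== SOURCE B (Python) =====
-- def max_energy_absorbed(aircrafts):
--     n = len(aircrafts)
--     nxt = 0   # best from index i+1 on
--     nxt2 = 0  # best from index i+2 on
--     for i in range(n - 1, -1, -1):
--         if i + 1 < n:
--             cur = max(nxt, aircrafts[i] + aircrafts[i + 1] + nxt2)
--         else:
--             cur = nxt
--         nxt2, nxt = nxt, cur
--     return nxt
-- ===== Notes on version B (the rewrite author's own statement) =====
-- stated objective: simpler
-- what changed: Replaced the top-down memoized recursion (closure + n×2 memo table) by a bottom-up loop over indices n-1..0 keeping only two rolling accumulators (best-from-i+1, best-from-i+2).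
import Mathlib
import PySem

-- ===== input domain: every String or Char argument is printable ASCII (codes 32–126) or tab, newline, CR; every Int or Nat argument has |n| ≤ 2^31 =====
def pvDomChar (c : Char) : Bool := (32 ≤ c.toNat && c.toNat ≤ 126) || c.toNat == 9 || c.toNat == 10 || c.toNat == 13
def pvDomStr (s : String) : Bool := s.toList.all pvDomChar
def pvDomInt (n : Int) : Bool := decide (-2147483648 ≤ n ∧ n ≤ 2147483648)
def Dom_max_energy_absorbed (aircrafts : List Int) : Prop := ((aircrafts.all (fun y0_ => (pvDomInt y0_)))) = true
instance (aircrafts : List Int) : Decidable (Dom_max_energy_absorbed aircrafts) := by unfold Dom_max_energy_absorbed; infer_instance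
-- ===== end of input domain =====

-- B replaces A's top-down memoized recursion by a bottom-up loop with two rolling
-- accumulators (objective: simpler, no recursion/memo table). Return values only
-- are compared; A's memo is a pure cache and is not modelled (it never changes values).

-- ===== PORT A =====
-- dp(index, cooldown) of A; the memo table only caches already-computed values,
-- so the uncached recursion below computes the same results. Indices accessed
-- are proven in range by the `index + 1 < n` guard, so getD is exact here.
def dpA (aircrafts : List Int) (index cooldown : Nat) : Int :=
  if index ≥ aircrafts.length then 0
  else
    let max_energy := dpA aircrafts (index + 1) 0
    if cooldown = 0 ∧ index + 1 < aircrafts.length then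
      max max_energy (aircrafts.getD index 0 + aircrafts.getD (index + 1) 0 +
        dpA aircrafts (index + 2) 0)
    else max_energy
termination_by aircrafts.length - index

def max_energy_absorbed (aircrafts : List Int) : Int := dpA aircrafts 0 0

-- ===== PORT B =====
-- loopB a k = (nxt, nxt2) after the loop of Source B has processed the k last
-- indices, i.e. i = a.length-1 down to a.length-k.
def loopB (a : List Int) : Nat → Int × Int
  | 0 => (0, 0)
  | k + 1 =>
    let s := loopB a k
    let i := a.length - (k + 1)
    let cur := if i + 1 < a.length
      then max s.1 (a.getD i 0 + a.getD (i + 1) 0 + s.2)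
      else s.1
    (cur, s.1)

def max_energy_absorbed_alt (aircrafts : List Int) : Int :=
  (loopB aircrafts aircrafts.length).1

-- ===== PRECONDITION & SPEC =====
def Spec_max_energy_absorbed (aircrafts : List Int) (out : Int) : Prop := out = max_energy_absorbed_alt aircrafts
instance (aircrafts : List Int) (out : Int) : Decidable (Spec_max_energy_absorbed aircrafts out) := by unfold Spec_max_energy_absorbed; infer_instance

-- ===== CLAIM (what is proved, stated in full; the proofs are below) =====
def Claim_equal_max_energy_absorbed : Prop := ∀ (aircrafts : List Int), Dom_max_energy_absorbed aircrafts → Spec_max_energy_absorbed aircrafts (max_energy_absorbed aircrafts)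

-- ===== LEMMAS AND PROOFS =====

theorem dpA_out (a : List Int) (i : Nat) (h : a.length ≤ i) : dpA a i 0 = 0 := by
  rw [dpA]; simp [h]

theorem loopB_invariant (a : List Int) (k : Nat) (hk : k ≤ a.length) :
    (loopB a k).1 = dpA a (a.length - k) 0 ∧
    (loopB a k).2 = dpA a (a.length - k + 1) 0 := by
  induction k with
  | zero =>
    simp [loopB, dpA_out a a.length (le_refl _), dpA_out a (a.length + 1) (by omega)]
  | succ k ih =>
    obtain ⟨h1, h2⟩ := ih (by omega)
    have hi1 : a.length - (k + 1) + 1 = a.length - k := by omega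
    have hi2 : a.length - (k + 1) + 2 = a.length - k + 1 := by omega
    constructor
    · show (let s := loopB a k
        let i := a.length - (k + 1)
        if i + 1 < a.length then max s.1 (a.getD i 0 + a.getD (i + 1) 0 + s.2) else s.1)
        = dpA a (a.length - (k + 1)) 0
      rw [dpA]
      have hlt : ¬ a.length - (k + 1) ≥ a.length := by omega
      simp only [hlt, if_false, true_and, h1, h2, hi1, hi2]
    · show (loopB a k).1 = dpA a (a.length - (k + 1) + 1) 0
      rw [hi1, h1]

-- ===== VERDICT (by name: the statement is the Claim_ definition above) =====
theorem max_energy_absorbed_spec : Claim_equal_max_energy_absorbed := by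
  intro a _
  show max_energy_absorbed a = max_energy_absorbed_alt a
  have h := (loopB_invariant a a.length (le_refl _)).1
  simp only [Nat.sub_self] at h
  rw [max_energy_absorbed, max_energy_absorbed_alt, h]
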